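-- pv_equiv track=rewrite | github.com/eskersoftware/Labellisation-GUI | src/util.py | give_top_right_corner
-- ===== SOURCE A (Python) =====
-- def give_top_right_corner(points):
--     """"
--     Give the top right point of the rectangle containing the given points.
--     It could be one of the given points.
--     """
--     top_right_corner = list(points[0])
--     for point in points:
--         if point[0]>top_right_corner[0]:        # update the max x
--             top_right_corner[0] = point[0]
--         if point[1]>top_right_corner[1]:        # update the max y
--             top_right_corner[1] = point[1]
--     return tuple(top_right_corner)
-- ===== SOURCE B (Python) =====
-- def give_top_right_corner(points):
--     """Sort each coordinate list and take the last (largest) element."""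
--     xs = sorted(p[0] for p in points)
--     ys = sorted(p[1] for p in points)
--     return (xs[-1], ys[-1])
-- ===== Notes on version B (the rewrite author's own statement) =====
-- stated objective: alternative
-- what changed: Replaces the fused running-max scan with sorting each coordinate list and taking its last element, so the maximum is obtained by order, not by a comparison loop.
import Mathlib
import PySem

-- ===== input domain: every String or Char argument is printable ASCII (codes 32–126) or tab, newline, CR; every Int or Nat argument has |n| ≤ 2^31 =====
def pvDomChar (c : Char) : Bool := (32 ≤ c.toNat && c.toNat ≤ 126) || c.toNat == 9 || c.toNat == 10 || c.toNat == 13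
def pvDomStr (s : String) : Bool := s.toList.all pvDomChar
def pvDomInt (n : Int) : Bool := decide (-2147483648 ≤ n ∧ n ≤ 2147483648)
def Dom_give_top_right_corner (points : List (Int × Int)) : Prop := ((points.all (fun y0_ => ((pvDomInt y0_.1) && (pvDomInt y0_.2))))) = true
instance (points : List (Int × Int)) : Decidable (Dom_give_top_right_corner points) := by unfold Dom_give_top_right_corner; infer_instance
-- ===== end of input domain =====

-- B sorts each coordinate list and takes the last element, instead of A's fused running-max scan (objective: alternative).
-- ===== PORT A =====
def give_top_right_corner (points : List (Int × Int)) : Int × Int :=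
  match PySem.List.pyGet? points 0 with
  | none => (0, 0)  -- Python raises IndexError here; excluded by Pre_
  | some p0 =>
    points.foldl
      (fun trc point =>
        (if point.1 > trc.1 then point.1 else trc.1,
         if point.2 > trc.2 then point.2 else trc.2)) p0

-- ===== PORT B =====
def give_top_right_corner_alt (points : List (Int × Int)) : Int × Int :=
  let xs := PySem.List.sorted (points.map Prod.fst) (fun x => x) false
  let ys := PySem.List.sorted (points.map Prod.snd) (fun x => x) false
  match PySem.List.pyGet? xs (-1), PySem.List.pyGet? ys (-1) with
  | some a, some b => (a, b)
  | _, _ => (0, 0)  -- IndexError (empty); excluded by Pre_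

-- ===== PRECONDITION & SPEC =====
-- Pre_ excludes only the empty list, on which A raises IndexError (and B raises IndexError too).
def Pre_give_top_right_corner (points : List (Int × Int)) : Prop := points ≠ []
instance (points : List (Int × Int)) : Decidable (Pre_give_top_right_corner points) := by unfold Pre_give_top_right_corner; infer_instance
def pvWitness_give_top_right_corner : (List (Int × Int)) := [(1, 2), (3, 0)]
def Spec_give_top_right_corner (points : List (Int × Int)) (out : Int × Int) : Prop := out = give_top_right_corner_alt points
instance (points : List (Int × Int)) (out : Int × Int) : Decidable (Spec_give_top_right_corner points out) := by unfold Spec_give_top_right_corner; infer_instance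

-- ===== CLAIM (what is proved, stated in full; the proofs are below) =====
def Claim_equal_give_top_right_corner : Prop := ∀ (points : List (Int × Int)), Dom_give_top_right_corner points → Pre_give_top_right_corner points → Spec_give_top_right_corner points (give_top_right_corner points)

-- ===== LEMMAS AND PROOFS =====

-- A's fused scan computes the two running maxima componentwise.
theorem fold_fst (l : List (Int × Int)) (a : Int × Int) :
    (l.foldl (fun trc point =>
        ((if point.1 > trc.1 then point.1 else trc.1 : Int),
         (if point.2 > trc.2 then point.2 else trc.2 : Int))) a)
      = ((l.map Prod.fst).foldl max a.1, (l.map Prod.snd).foldl max a.2) := by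
  induction l generalizing a with
  | nil => simp
  | cons p t ih =>
    simp only [List.foldl_cons, List.map_cons, ih]
    have h1 : (max a.1 p.1) = (if p.1 > a.1 then p.1 else a.1) := by
      rw [max_def]; split_ifs <;> omega
    have h2 : (max a.2 p.2) = (if p.2 > a.2 then p.2 else a.2) := by
      rw [max_def]; split_ifs <;> omega
    rw [← h1, ← h2]

-- The last element of the (stably) sorted list is the running maximum.
theorem last_sorted_eq_foldl_max (x : Int) (t : List Int) :
    (PySem.List.sorted (x :: t) (fun y => y) false).getLast? = some (t.foldl max x) := by
  set s := PySem.List.sorted (x :: t) (fun y => y) false with hs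
  have hne : s ≠ [] := by
    intro h
    exact (List.cons_ne_nil x t) ((PySem.List.sorted_eq_nil_iff _ _ _).1 (hs ▸ h))
  rw [List.getLast?_eq_getLast_of_ne_nil hne]
  congr 1
  have hmaxmem : t.foldl max x ∈ (x :: t) := by
    have := PySem.List.max?_mem (xs := x :: t) (key := fun y => y)
      (m := t.foldl max x) (by rw [PySem.List.max?_id_cons])
    exact this
  have hmax_ub : ∀ y ∈ (x :: t), y ≤ t.foldl max x := by
    intro y hy
    exact PySem.List.max?_isMax (by rw [PySem.List.max?_id_cons]) y hy
  have hlast_mem : s.getLast hne ∈ (x :: t) := by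
    have h1 : s.getLast hne ∈ s := List.getLast_mem hne
    exact (PySem.List.mem_sorted (x :: t) (fun y => y) false _).1 h1
  -- the last element is an upper bound of everything in the sorted list
  have hlast_ub : ∀ y ∈ s, y ≤ s.getLast hne := by
    intro y hy
    obtain ⟨i, hi, hyi⟩ := List.mem_iff_getElem.1 hy
    have hlen : 0 < s.length := List.length_pos_of_ne_nil hne
    have hgl : s.getLast hne = s[s.length - 1] := List.getLast_eq_getElem hne
    have hmono := PySem.List.sorted_id_getElem_mono (xs := x :: t)
      (p := i) (q := s.length - 1) (by omega) (by rw [← hs]; omega)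
    rw [hgl, ← hyi]
    simpa [← hs] using hmono
  have h1 : s.getLast hne ≤ t.foldl max x := hmax_ub _ hlast_mem
  have h2 : t.foldl max x ≤ s.getLast hne := by
    have h3 : t.foldl max x ∈ s :=
      (PySem.List.mem_sorted (x :: t) (fun y => y) false _).2 hmaxmem
    exact hlast_ub _ h3
  omega

-- ===== VERDICT (by name: the statement is the Claim_ definition above) =====
theorem give_top_right_corner_spec : Claim_equal_give_top_right_corner := by
  intro points _ hpre
  cases points with
  | nil => exact absurd rfl hpre
  | cons p t =>
    show give_top_right_corner (p :: t) = give_top_right_corner_alt (p :: t)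
    simp only [give_top_right_corner, give_top_right_corner_alt,
      PySem.List.pyGet?_zero_cons, PySem.List.pyGet?_neg_one, List.map_cons]
    rw [fold_fst, last_sorted_eq_foldl_max, last_sorted_eq_foldl_max]
    simp [List.foldl_cons]
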